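-- pv_equiv track=rewrite | github.com/VitamintK/AlgorithmProblems | google-code-jam/2022/qualification/d.py | dfs
-- ===== SOURCE A (Python) =====
-- def dfs(children, fs, i):
--     """returns (the smallest possible fun factor rooted at i, sum)"""
--     if len(children[i])==0:
--         return fs[i], fs[i]
--     agg = 0
--     ans = []
--     for child in children[i]:
--         smallest, sm = dfs(children, fs, child)
--         ans.append(smallest)
--         agg += sm
--     mn = min(ans)
--     if fs[i] > mn:
--         agg += fs[i] - mn
--     return max(fs[i], mn), agg
-- ===== SOURCE B (Python) =====
-- def smallest(children, fs, k):
--     cs = children[k]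
--     if len(cs) == 0:
--         return fs[k]
--     return max(fs[k], min([smallest(children, fs, c) for c in cs]))
--
--
-- def total(children, fs, k):
--     cs = children[k]
--     if len(cs) == 0:
--         return fs[k]
--     m = min([smallest(children, fs, c) for c in cs])
--     t = sum([total(children, fs, c) for c in cs])
--     return t + (fs[k] - m) if fs[k] > m else t
--
--
-- def dfs(children, fs, i):
--     """returns (the smallest possible fun factor rooted at i, sum)"""
--     return smallest(children, fs, i), total(children, fs, i)
-- ===== Notes on version B (the rewrite author's own statement) =====
-- stated objective: alternative
-- what changed: A's single pair-valued recursion that builds a list of child results per node is split into two independent scalar recursions (smallest fun factor, and total cost using smallest on the children), combined only at the top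
import Mathlib
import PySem

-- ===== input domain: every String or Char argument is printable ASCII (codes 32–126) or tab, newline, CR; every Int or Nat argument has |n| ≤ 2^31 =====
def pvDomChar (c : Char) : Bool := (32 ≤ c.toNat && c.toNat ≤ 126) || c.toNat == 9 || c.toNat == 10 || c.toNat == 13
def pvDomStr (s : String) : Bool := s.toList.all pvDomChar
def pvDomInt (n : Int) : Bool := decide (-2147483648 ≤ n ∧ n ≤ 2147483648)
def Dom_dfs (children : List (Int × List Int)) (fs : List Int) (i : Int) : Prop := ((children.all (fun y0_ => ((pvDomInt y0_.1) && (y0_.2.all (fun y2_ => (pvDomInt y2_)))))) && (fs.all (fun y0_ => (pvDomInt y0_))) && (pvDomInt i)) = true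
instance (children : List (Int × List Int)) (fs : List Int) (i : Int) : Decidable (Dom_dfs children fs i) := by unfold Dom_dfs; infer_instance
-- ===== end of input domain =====

-- B splits A's single pair-valued recursion into two independent scalar recursions
-- (smallest fun factor, and total cost), combined only at the top; equal return values on Pre_.

-- ===== PORT A =====
-- literal transliteration of A; the recursion is run on fuel (children.length + 1, enough under
-- Pre_); fuel exhaustion or a raising lookup yields none, and the raising inputs are outside Pre_
def dfsFuelA (children : PySem.Dict Int (List Int)) (fs : List Int) : Nat → Int → Option (Int × Int)
  | 0, _ => none
  | fuel + 1, i =>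
    match children.get? i with
    | none => none                            -- KeyError
    | some cs =>
      if cs.length = 0 then
        match PySem.List.pyGet? fs i with
        | none => none                        -- IndexError
        | some f => some (f, f)
      else
        match cs.foldlM (fun (st : Int × List Int) child =>
            match dfsFuelA children fs fuel child with
            | none => none
            | some r => some (st.1 + r.2, st.2 ++ [r.1])) ((0 : Int), ([] : List Int)) with
        | none => none
        | some p =>
          match PySem.List.min? p.2 (fun x => x) with
          | none => none
          | some mn =>
            match PySem.List.pyGet? fs i with
            | none => none                    -- IndexError
            | some f => some (max f mn, if f > mn then p.1 + (f - mn) else p.1)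

def dfs (children : List (Int × List Int)) (fs : List Int) (i : Int) : Int × Int :=
  (dfsFuelA (PySem.Dict.mk children) fs (children.length + 1) i).getD (0, 0)

-- ===== PORT B =====
-- hand port of a Python list comprehension [g(c) for c in cs] whose body may raise
def mapO (g : Int → Option Int) : List Int → Option (List Int)
  | [] => some []
  | c :: cs =>
    match g c with
    | none => none
    | some v =>
      match mapO g cs with
      | none => none
      | some vs => some (v :: vs)

-- Source B's `smallest`, on fuel like A's port
def smF (children : PySem.Dict Int (List Int)) (fs : List Int) : Nat → Int → Option Int
  | 0, _ => none
  | fuel + 1, k =>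
    match children.get? k with
    | none => none                            -- KeyError
    | some cs =>
      if cs.length = 0 then PySem.List.pyGet? fs k
      else
        match mapO (smF children fs fuel) cs with
        | none => none
        | some vs =>
          match PySem.List.min? vs (fun x => x) with
          | none => none
          | some m =>
            match PySem.List.pyGet? fs k with
            | none => none                    -- IndexError
            | some f => some (max f m)

-- Source B's `total`, calling smF on the children
def totF (children : PySem.Dict Int (List Int)) (fs : List Int) : Nat → Int → Option Int
  | 0, _ => none
  | fuel + 1, k =>
    match children.get? k with
    | none => none                            -- KeyError
    | some cs =>
      if cs.length = 0 then PySem.List.pyGet? fs k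
      else
        match mapO (smF children fs fuel) cs with
        | none => none
        | some svs =>
          match PySem.List.min? svs (fun x => x) with
          | none => none
          | some m =>
            match mapO (totF children fs fuel) cs with
            | none => none
            | some tvs =>
              match PySem.List.pyGet? fs k with
              | none => none                  -- IndexError
              | some f =>
                some (if f > m then tvs.foldl (· + ·) 0 + (f - m) else tvs.foldl (· + ·) 0)

def dfs_alt (children : List (Int × List Int)) (fs : List Int) (i : Int) : Int × Int :=
  match smF (PySem.Dict.mk children) fs (children.length + 1) i,
        totF (PySem.Dict.mk children) fs (children.length + 1) i with
  | some s, some t => (s, t)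
  | _, _ => (0, 0)

-- ===== PRECONDITION & SPEC =====
-- graph vocabulary for the precondition (a description of the input graph, not of either port):
-- the children of a node, one expansion step of a node set, and the reachable closure
def childSetF (children : List (Int × List Int)) (k : Int) : Finset Int :=
  (((PySem.Dict.mk children).get? k).getD []).toFinset

def stepF (children : List (Int × List Int)) (S : Finset Int) : Finset Int :=
  S ∪ S.biUnion (childSetF children)

def reachF (children : List (Int × List Int)) (S : Finset Int) : Finset Int :=
  (stepF children)^[(S ∪ (children.map Prod.fst).toFinset ∪ (children.flatMap Prod.snd).toFinset).card.succ] S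

-- Pre_ = exactly the inputs where the Python A returns: duplicate keys never arise from a Python
-- dict argument, and every node reachable from i must be a key of the dict, a valid fs index,
-- and not lie on a cycle (A raises KeyError/IndexError/RecursionError otherwise)
def Pre_dfs (children : List (Int × List Int)) (fs : List Int) (i : Int) : Prop :=
  (children.map Prod.fst).Nodup ∧
  ∀ k ∈ reachF children {i},
    ((PySem.Dict.mk children).get? k).isSome = true ∧
    PySem.Raise.InRange fs.length k ∧
    k ∉ reachF children (childSetF children k)

instance (children : List (Int × List Int)) (fs : List Int) (i : Int) : Decidable (Pre_dfs children fs i) := by unfold Pre_dfs; infer_instance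

def pvWitness_dfs : (List (Int × List Int)) × List Int × Int :=
  ([(0, [1, 2]), (1, []), (2, [1])], [5, 3, 4], 0)

def Spec_dfs (children : List (Int × List Int)) (fs : List Int) (i : Int) (out : Int × Int) : Prop := out = dfs_alt children fs i
instance (children : List (Int × List Int)) (fs : List Int) (i : Int) (out : Int × Int) : Decidable (Spec_dfs children fs i out) := by unfold Spec_dfs; infer_instance

-- ===== CLAIM (what is proved, stated in full; the proofs are below) =====
def Claim_equal_dfs : Prop := ∀ (children : List (Int × List Int)) (fs : List Int) (i : Int), Dom_dfs children fs i → Pre_dfs children fs i → Spec_dfs children fs i (dfs children fs i)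

-- ===== LEMMAS AND PROOFS =====

-- ---- generic facts about iterating an inflationary set map ----

theorem pv_stepF_incl (children : List (Int × List Int)) (T : Finset Int) : T ⊆ stepF children T :=
  Finset.subset_union_left

theorem pv_stepF_mono (children : List (Int × List Int)) {X Y : Finset Int} (h : X ⊆ Y) :
    stepF children X ⊆ stepF children Y :=
  Finset.union_subset_union h (Finset.biUnion_subset_biUnion_of_subset_left _ h)

theorem pv_subset_iterate (children : List (Int × List Int)) (S : Finset Int) :
    ∀ n, S ⊆ (stepF children)^[n] S := by
  intro n
  induction n with
  | zero => simp
  | succ n ih =>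
    rw [Function.iterate_succ_apply']
    exact ih.trans (pv_stepF_incl children _)

theorem pv_iter_closed (children : List (Int × List Int)) {T : Finset Int}
    (hT : stepF children T ⊆ T) {S : Finset Int} (hS : S ⊆ T) :
    ∀ n, (stepF children)^[n] S ⊆ T := by
  intro n
  induction n with
  | zero => simpa using hS
  | succ n ih =>
    rw [Function.iterate_succ_apply']
    exact (pv_stepF_mono children ih).trans hT

theorem pv_card_grow (children : List (Int × List Int)) (S : Finset Int) :
    ∀ j, (∀ m, m < j → (stepF children)^[m + 1] S ≠ (stepF children)^[m] S) →
      j ≤ ((stepF children)^[j] S).card := by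
  intro j
  induction j with
  | zero => intro _; exact Nat.zero_le _
  | succ j ih =>
    intro h
    have hij : j ≤ ((stepF children)^[j] S).card := ih (fun m hm => h m (Nat.lt_succ_of_lt hm))
    have hss : (stepF children)^[j] S ⊂ (stepF children)^[j + 1] S := by
      constructor
      · rw [Function.iterate_succ_apply']
        exact pv_stepF_incl children _
      · intro hsub
        exact h j (Nat.lt_succ_self j)
          (Finset.Subset.antisymm hsub (by rw [Function.iterate_succ_apply']; exact pv_stepF_incl children _))
    exact Nat.succ_le_of_lt (Nat.lt_of_le_of_lt hij (Finset.card_lt_card hss))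

theorem pv_fix_propagate (children : List (Int × List Int)) (S : Finset Int) {j : ℕ}
    (hfix : (stepF children)^[j + 1] S = (stepF children)^[j] S) :
    ∀ m, (stepF children)^[j + m] S = (stepF children)^[j] S := by
  intro m
  induction m with
  | zero => rfl
  | succ m ih =>
    have heq : j + (m + 1) = (j + m) + 1 := by omega
    have hs : stepF children ((stepF children)^[j] S) = (stepF children)^[j + 1] S :=
      (Function.iterate_succ_apply' _ _ _).symm
    rw [heq, Function.iterate_succ_apply', ih, hs, hfix]

theorem pv_childSetF_subset (children : List (Int × List Int)) (k : Int) :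
    childSetF children k ⊆ (children.flatMap Prod.snd).toFinset := by
  intro x hx
  unfold childSetF at hx
  cases hc : (PySem.Dict.mk children).get? k with
  | none => rw [hc] at hx; simp at hx
  | some cs =>
    rw [hc] at hx
    simp only [Option.getD_some, List.mem_toFinset] at hx
    have hmem : (k, cs) ∈ children := PySem.Dict.mem_items_of_get?_eq_some _ hc
    rw [List.mem_toFinset, List.mem_flatMap]
    exact ⟨(k, cs), hmem, hx⟩

theorem pv_reachF_closed (children : List (Int × List Int)) (S : Finset Int) :
    stepF children (reachF children S) = reachF children S := by
  set U : Finset Int :=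
    S ∪ (children.map Prod.fst).toFinset ∪ (children.flatMap Prod.snd).toFinset with hU
  have habs : stepF children U ⊆ U := by
    apply Finset.union_subset (Finset.Subset.refl U)
    intro x hx
    rw [Finset.mem_biUnion] at hx
    obtain ⟨k, _, hk⟩ := hx
    exact Finset.mem_union_right _ (pv_childSetF_subset children k hk)
  have hSU : S ⊆ U := (Finset.subset_union_left).trans Finset.subset_union_left
  have hiter : ∀ n, (stepF children)^[n] S ⊆ U := pv_iter_closed children habs hSU
  have hex : ∃ j, j ≤ U.card ∧ (stepF children)^[j + 1] S = (stepF children)^[j] S := by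
    by_contra hno
    push Not at hno
    have hgrow : U.card + 1 ≤ ((stepF children)^[U.card + 1] S).card := by
      apply pv_card_grow children S
      intro m hm
      exact hno m (by omega)
    have : ((stepF children)^[U.card + 1] S).card ≤ U.card :=
      Finset.card_le_card (hiter (U.card + 1))
    omega
  obtain ⟨j, hj, hfix⟩ := hex
  have h1 : (stepF children)^[U.card + 1] S = (stepF children)^[j] S := by
    have := pv_fix_propagate children S hfix (U.card + 1 - j)
    rwa [show j + (U.card + 1 - j) = U.card + 1 by omega] at this
  have h2 : (stepF children)^[U.card + 1 + 1] S = (stepF children)^[j] S := by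
    have := pv_fix_propagate children S hfix (U.card + 2 - j)
    rwa [show j + (U.card + 2 - j) = U.card + 1 + 1 by omega] at this
  show stepF children ((stepF children)^[U.card + 1] S) = (stepF children)^[U.card + 1] S
  have hs : stepF children ((stepF children)^[U.card + 1] S)
      = (stepF children)^[U.card + 1 + 1] S := (Function.iterate_succ_apply' _ _ _).symm
  rw [hs, h2, h1]

theorem pv_subset_reachF (children : List (Int × List Int)) (S : Finset Int) :
    S ⊆ reachF children S :=
  pv_subset_iterate children S _

theorem pv_reachF_min (children : List (Int × List Int)) {T : Finset Int}
    (hT : stepF children T ⊆ T) {S : Finset Int} (hS : S ⊆ T) :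
    reachF children S ⊆ T :=
  pv_iter_closed children hT hS _

theorem pv_child_mem_reach {children : List (Int × List Int)} {S : Finset Int} {k c : Int}
    (hk : k ∈ reachF children S) (hc : c ∈ childSetF children k) :
    c ∈ reachF children S := by
  have : c ∈ stepF children (reachF children S) :=
    Finset.mem_union_right _ (Finset.mem_biUnion.2 ⟨k, hk, hc⟩)
  rwa [pv_reachF_closed children S] at this

theorem pv_measure_lt {children : List (Int × List Int)} {k c : Int}
    (hacy : k ∉ reachF children (childSetF children k)) (hc : c ∈ childSetF children k) :
    (reachF children {c}).card < (reachF children {k}).card := by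
  have hkk : k ∈ reachF children {k} :=
    pv_subset_reachF children {k} (Finset.mem_singleton_self k)
  have hck : c ∈ reachF children {k} := pv_child_mem_reach hkk hc
  have hsub : reachF children {c} ⊆ reachF children {k} :=
    pv_reachF_min children (le_of_eq (pv_reachF_closed children {k}))
      (Finset.singleton_subset_iff.2 hck)
  have hknot : k ∉ reachF children {c} := by
    intro hmem
    apply hacy
    have hsub2 : reachF children {c} ⊆ reachF children (childSetF children k) :=
      pv_reachF_min children (le_of_eq (pv_reachF_closed children _))
        (Finset.singleton_subset_iff.2 (pv_subset_reachF children _ hc))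
    exact hsub2 hmem
  exact Finset.card_lt_card ⟨hsub, fun hsub' => hknot (hsub' hkk)⟩

-- ---- the reference value (A's result with just enough fuel) ----

def refVal (children : List (Int × List Int)) (fs : List Int) (k : Int) : Int × Int :=
  (dfsFuelA (PySem.Dict.mk children) fs ((reachF children {k}).card + 1) k).getD (0, 0)

-- ---- evaluating A's children loop ----

theorem pv_foldA (childrenD : PySem.Dict Int (List Int)) (fs : List Int) (m : ℕ)
    (w : Int → Int × Int) :
    ∀ (cs : List Int) (a : Int) (l : List Int),
      (∀ c ∈ cs, dfsFuelA childrenD fs m c = some (w c)) →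
      cs.foldlM (fun (st : Int × List Int) child =>
          match dfsFuelA childrenD fs m child with
          | none => none
          | some r => some (st.1 + r.2, st.2 ++ [r.1])) (a, l)
        = some (cs.foldl (fun x c => x + (w c).2) a, l ++ cs.map (fun c => (w c).1)) := by
  intro cs
  induction cs with
  | nil => intro a l _; simp [List.foldlM]
  | cons c cs ih =>
    intro a l h
    rw [List.foldlM_cons]
    rw [h c List.mem_cons_self]
    simp only [Option.bind_eq_bind, Option.bind_some]
    rw [ih (a + (w c).2) (l ++ [(w c).1]) (fun c' hc' => h c' (List.mem_cons_of_mem _ hc'))]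
    simp

-- ---- evaluating B's comprehensions ----

theorem pv_mapO_some (g : Int → Option Int) (w : Int → Int) :
    ∀ (cs : List Int), (∀ c ∈ cs, g c = some (w c)) → mapO g cs = some (cs.map w) := by
  intro cs
  induction cs with
  | nil => intro _; rfl
  | cons c cs ih =>
    intro h
    simp only [mapO, h c List.mem_cons_self, ih (fun c' hc' => h c' (List.mem_cons_of_mem _ hc')),
      List.map_cons]

theorem pv_sum_foldl (w : Int → Int × Int) :
    ∀ (cs : List Int) (a : Int),
      (cs.map (fun c => (w c).2)).foldl (· + ·) a = cs.foldl (fun x c => x + (w c).2) a := by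
  intro cs a
  rw [List.foldl_map]

-- ---- the main induction: A, smF and totF all compute refVal ----

theorem pv_main (children : List (Int × List Int)) (fs : List Int) (i : Int)
    (hpre : Pre_dfs children fs i) :
    ∀ n k, k ∈ reachF children {i} → (reachF children {k}).card = n →
      (∀ fuel, n < fuel →
        dfsFuelA (PySem.Dict.mk children) fs fuel k = some (refVal children fs k)) ∧
      (∀ fuel, n < fuel →
        smF (PySem.Dict.mk children) fs fuel k = some (refVal children fs k).1) ∧
      (∀ fuel, n < fuel →
        totF (PySem.Dict.mk children) fs fuel k = some (refVal children fs k).2) := by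
  intro n
  induction n using Nat.strong_induction_on with
  | _ n IH =>
    intro k hkR hn
    obtain ⟨hsome, hrange, hacy⟩ := hpre.2 k hkR
    obtain ⟨cs, hcs⟩ := Option.isSome_iff_exists.1 hsome
    have hfs : ∃ f, PySem.List.pyGet? fs k = some f := by
      cases hg : PySem.List.pyGet? fs k with
      | none => exact absurd ((PySem.List.pyGet?_eq_none_iff fs k).1 hg) (by simpa using hrange)
      | some f => exact ⟨f, rfl⟩
    obtain ⟨f, hf⟩ := hfs
    by_cases hlen : cs.length = 0
    · -- leaf
      have hnil : cs = [] := List.eq_nil_of_length_eq_zero hlen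
      have hA : ∀ fuel, n < fuel →
          dfsFuelA (PySem.Dict.mk children) fs fuel k = some (f, f) := by
        intro fuel hfuel
        cases fuel with
        | zero => omega
        | succ m => simp [dfsFuelA, hcs, hnil, hf]
      have hrv : refVal children fs k = (f, f) := by
        unfold refVal
        rw [hn, hA (n + 1) (Nat.lt_succ_self n)]
        rfl
      refine ⟨by rw [hrv]; exact hA, ?_, ?_⟩
      · intro fuel hfuel
        cases fuel with
        | zero => omega
        | succ m => rw [hrv]; simp [smF, hcs, hnil, hf]
      · intro fuel hfuel
        cases fuel with
        | zero => omega
        | succ m => rw [hrv]; simp [totF, hcs, hnil, hf]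
    · -- internal node
      have hne : cs ≠ [] := fun h => hlen (by rw [h]; rfl)
      obtain ⟨c0, cs', rfl⟩ := List.exists_cons_of_ne_nil hne
      have hchild : ∀ c ∈ c0 :: cs', c ∈ childSetF children k := by
        intro c hc
        unfold childSetF
        rw [hcs]
        simpa using hc
      have hcR : ∀ c ∈ c0 :: cs', c ∈ reachF children {i} :=
        fun c hc => pv_child_mem_reach hkR (hchild c hc)
      have hclt : ∀ c ∈ c0 :: cs', (reachF children {c}).card < n := by
        intro c hc
        rw [← hn]
        exact pv_measure_lt hacy (hchild c hc)
      have hAc : ∀ c ∈ c0 :: cs', ∀ fuel, (reachF children {c}).card < fuel →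
          dfsFuelA (PySem.Dict.mk children) fs fuel c = some (refVal children fs c) :=
        fun c hc => ((IH _ (hclt c hc) c (hcR c hc) rfl).1)
      have hSc : ∀ c ∈ c0 :: cs', ∀ fuel, (reachF children {c}).card < fuel →
          smF (PySem.Dict.mk children) fs fuel c = some (refVal children fs c).1 :=
        fun c hc => ((IH _ (hclt c hc) c (hcR c hc) rfl).2.1)
      have hTc : ∀ c ∈ c0 :: cs', ∀ fuel, (reachF children {c}).card < fuel →
          totF (PySem.Dict.mk children) fs fuel c = some (refVal children fs c).2 :=
        fun c hc => ((IH _ (hclt c hc) c (hcR c hc) rfl).2.2)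
      set agg : Int := (c0 :: cs').foldl (fun x c => x + (refVal children fs c).2) 0 with hagg
      set mnA : Int := (cs'.map (fun c => (refVal children fs c).1)).foldl min ((refVal children fs c0).1) with hmnA
      set r : Int × Int := (max f mnA, if f > mnA then agg + (f - mnA) else agg) with hr
      have hA : ∀ fuel, n < fuel →
          dfsFuelA (PySem.Dict.mk children) fs fuel k = some r := by
        intro fuel hfuel
        cases fuel with
        | zero => omega
        | succ m =>
          have hm : ∀ c ∈ c0 :: cs', dfsFuelA (PySem.Dict.mk children) fs m c = some (refVal children fs c) := by
            intro c hc
            exact hAc c hc m (by have := hclt c hc; omega)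
          simp only [dfsFuelA, hcs]
          rw [if_neg hlen]
          rw [pv_foldA (PySem.Dict.mk children) fs m (refVal children fs) (c0 :: cs') 0 [] hm]
          simp only [List.nil_append, List.map_cons]
          rw [PySem.List.min?_id_cons]
          rw [← hmnA, hf]
      have hrv : refVal children fs k = r := by
        unfold refVal
        rw [hn, hA (n + 1) (Nat.lt_succ_self n)]
        rfl
      have hmapS : ∀ m : ℕ, n ≤ m →
          mapO (smF (PySem.Dict.mk children) fs m) (c0 :: cs')
            = some ((c0 :: cs').map (fun c => (refVal children fs c).1)) := by
        intro m hm
        apply pv_mapO_some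
        intro c hc
        exact hSc c hc m (by have := hclt c hc; omega)
      have hminS : ∀ m : ℕ, n ≤ m →
          (mapO (smF (PySem.Dict.mk children) fs m) (c0 :: cs')).bind
            (fun vs => PySem.List.min? vs (fun x => x)) = some mnA := by
        intro m hm
        rw [hmapS m hm]
        rw [Option.bind_some, List.map_cons, PySem.List.min?_id_cons]
      refine ⟨by rw [hrv]; exact hA, ?_, ?_⟩
      · -- smF
        intro fuel hfuel
        cases fuel with
        | zero => omega
        | succ m =>
          have hmin := hminS m (by omega)
          rw [hmapS m (by omega), Option.bind_some] at hmin
          simp only [smF, hcs]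
          rw [if_neg hlen, hmapS m (by omega), hrv]
          simp only [hmin, hf, hr]
      · -- totF
        intro fuel hfuel
        cases fuel with
        | zero => omega
        | succ m =>
          have hmin := hminS m (by omega)
          rw [hmapS m (by omega), Option.bind_some] at hmin
          have hmapT : mapO (totF (PySem.Dict.mk children) fs m) (c0 :: cs')
              = some ((c0 :: cs').map (fun c => (refVal children fs c).2)) := by
            apply pv_mapO_some
            intro c hc
            exact hTc c hc m (by have := hclt c hc; omega)
          simp only [totF, hcs]
          rw [if_neg hlen, hmapS m (by omega), hrv]
          simp only [hmin, hmapT, hf]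
          rw [pv_sum_foldl (refVal children fs) (c0 :: cs') 0, ← hagg, hr]

-- ===== VERDICT (by name: the statement is the Claim_ definition above) =====
theorem dfs_spec : Claim_equal_dfs := by
  intro children fs i _hdom hpre
  unfold Spec_dfs
  have hiR : i ∈ reachF children {i} :=
    pv_subset_reachF children {i} (Finset.mem_singleton_self i)
  have hbound : (reachF children {i}).card ≤ children.length := by
    have hsub : reachF children {i} ⊆ (children.map Prod.fst).toFinset := by
      intro k hk
      obtain ⟨cs, hcs⟩ := Option.isSome_iff_exists.1 (hpre.2 k hk).1
      have hmem : (k, cs) ∈ children := PySem.Dict.mem_items_of_get?_eq_some _ hcs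
      rw [List.mem_toFinset]
      exact List.mem_map.2 ⟨(k, cs), hmem, rfl⟩
    calc (reachF children {i}).card ≤ ((children.map Prod.fst).toFinset).card :=
          Finset.card_le_card hsub
      _ ≤ (children.map Prod.fst).length := List.toFinset_card_le _
      _ = children.length := List.length_map ..
  obtain ⟨hA, hS, hT⟩ := pv_main children fs i hpre (reachF children {i}).card i hiR rfl
  unfold dfs dfs_alt
  rw [hA (children.length + 1) (by omega), hS (children.length + 1) (by omega),
      hT (children.length + 1) (by omega)]
  rfl
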